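-- pv_equiv track=rewrite | github.com/theabbie/leetcode | remove-9.py | newInteger
-- ===== SOURCE A (Python) =====
-- def newInteger(n: int) -> int:
--     d = []
--     while n:
--         d.append(n % 9)
--         n //= 9
--     d.reverse()
--     res = 0
--     for x in d:
--         res = 10 * res + x
--     return res
-- ===== SOURCE B (Python) =====
-- def newInteger(n: int) -> int:
--     # Direct recursion on the number: the base-9 digits of n read in base 10
--     # satisfy f(n) = f(n // 9) * 10 + n % 9 with f(0) = 0.  No digit list,
--     # no reverse, no second pass.  (Diverges on negative n, like A.)
--     if n == 0:
--         return 0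
--     return newInteger(n // 9) * 10 + n % 9
-- ===== Notes on version B (the rewrite author's own statement) =====
-- stated objective: simpler
-- what changed: B replaces A's three-stage pipeline (collect digits into a list, reverse it, Horner-fold it) by one direct recursion f(n) = f(n//9)*10 + n%9 with no list or second pass.
import Mathlib
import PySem

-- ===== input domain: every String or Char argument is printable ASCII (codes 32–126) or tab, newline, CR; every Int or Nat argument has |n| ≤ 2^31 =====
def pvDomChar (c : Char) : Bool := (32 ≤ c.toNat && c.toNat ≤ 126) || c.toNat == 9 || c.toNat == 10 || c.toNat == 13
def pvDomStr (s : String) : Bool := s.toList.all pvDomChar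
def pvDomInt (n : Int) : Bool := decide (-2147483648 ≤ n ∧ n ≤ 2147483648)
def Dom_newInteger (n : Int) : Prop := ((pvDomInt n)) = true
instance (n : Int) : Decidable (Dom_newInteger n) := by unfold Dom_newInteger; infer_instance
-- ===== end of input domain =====

-- B replaces A's collect/reverse/fold pipeline by one direct recursion
-- f(n) = f(n//9)*10 + n%9 (objective: simpler).


-- ===== PORT A =====
-- A's `while n:` digit-collecting loop; for nonnegative n (where the Python returns)
-- the condition `n` is equivalent to `0 < n`, which we use so the recursion terminates
-- (on negative n the Python loops forever; nothing is claimed to match there).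
def newIntegerLoopA (n : Int) (d : List Int) : List Int :=
  if _h : 0 < n then
    newIntegerLoopA (PySem.Int.floordiv n 9) (d ++ [PySem.Int.mod n 9])
  else d
termination_by n.toNat
decreasing_by
  have : PySem.Int.floordiv n 9 = n / 9 := PySem.Int.floordiv_eq_ediv_of_pos (by omega)
  rw [this]; omega

def newInteger (n : Int) : Int :=
  let d := newIntegerLoopA n []
  let d := d.reverse
  d.foldl (fun res x => 10 * res + x) 0

-- ===== PORT B =====
-- B's recursion `f(0)=0; f(n)=f(n//9)*10 + n%9`; the base case `n == 0` is rendered as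
-- `¬ 0 < n` for termination — for nonnegative n (where the Python returns) they agree
-- (B's Python recurses forever on negative n, like A's loop; nothing is claimed there).
def newInteger_alt (n : Int) : Int :=
  if _h : 0 < n then
    newInteger_alt (PySem.Int.floordiv n 9) * 10 + PySem.Int.mod n 9
  else 0
termination_by n.toNat
decreasing_by
  have : PySem.Int.floordiv n 9 = n / 9 := PySem.Int.floordiv_eq_ediv_of_pos (by omega)
  rw [this]; omega

-- ===== PRECONDITION & SPEC =====
def Spec_newInteger (n : Int) (out : Int) : Prop := out = newInteger_alt n
instance (n : Int) (out : Int) : Decidable (Spec_newInteger n out) := by unfold Spec_newInteger; infer_instance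

-- ===== CLAIM (what is proved, stated in full; the proofs are below) =====
def Claim_equal_newInteger : Prop := ∀ (n : Int), Dom_newInteger n → Spec_newInteger n (newInteger n)

-- ===== LEMMAS AND PROOFS =====

theorem fd9 (n : Int) (_h : 0 < n) : PySem.Int.floordiv n 9 = n / 9 :=
  PySem.Int.floordiv_eq_ediv_of_pos (by omega)

-- A's loop accumulator just appends: factor it out (induction on a fuel bound).
theorem loopA_acc_fuel (k : Nat) : ∀ (n : Int), n.toNat ≤ k → ∀ d : List Int,
    newIntegerLoopA n d = d ++ newIntegerLoopA n [] := by
  induction k with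
  | zero =>
      intro n hn d
      have hneg : ¬ 0 < n := by omega
      rw [newIntegerLoopA, dif_neg hneg, newIntegerLoopA, dif_neg hneg]; simp
  | succ k ih =>
      intro n hn d
      by_cases h : 0 < n
      · rw [newIntegerLoopA, dif_pos h, fd9 n (by omega)]
        conv_rhs => rw [newIntegerLoopA]
        rw [dif_pos h, fd9 n (by omega)]
        have hk : (n / 9).toNat ≤ k := by omega
        rw [ih _ hk, ih _ hk ([] ++ _)]
        simp
      · rw [newIntegerLoopA, dif_neg h, newIntegerLoopA, dif_neg h]; simp

-- key lemma: B's recursion equals the Horner fold of A's reversed digit list.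
theorem alt_eq_fold_fuel (k : Nat) : ∀ (n : Int), n.toNat ≤ k →
    newInteger_alt n
      = (newIntegerLoopA n []).reverse.foldl (fun r x => 10 * r + x) 0 := by
  induction k with
  | zero =>
      intro n hn
      have : ¬ 0 < n := by omega
      rw [newInteger_alt, dif_neg this, newIntegerLoopA, dif_neg this]; simp
  | succ k ih =>
      intro n hn
      by_cases h : 0 < n
      · rw [newInteger_alt, dif_pos h, newIntegerLoopA, dif_pos h, fd9 n (by omega)]
        have hk : (n / 9).toNat ≤ k := by omega
        rw [ih _ hk, loopA_acc_fuel k _ hk ([] ++ _)]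
        simp [List.foldl_append]
        ring
      · rw [newInteger_alt, dif_neg h, newIntegerLoopA, dif_neg h]; simp

-- ===== VERDICT (by name: the statement is the Claim_ definition above) =====
theorem newInteger_spec : Claim_equal_newInteger := by
  intro n _
  show _ = _
  rw [newInteger, alt_eq_fold_fuel n.toNat n le_rfl]
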